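-- pv_equiv track=rewrite | github.com/albertrosa/codewars_kata | digit_degree/digit_degree.py | digitDegree
-- ===== SOURCE A (Python) =====
-- def digitDegree(n):
--
--     # Convert the number to an array of strings
--     numbers = list(str(n))
--
--     # used to keep track of iterations
--     iterations = 0
--
--     # we will only need to iterate if there is more than one digit.
--     while numbers.__len__() > 1:
--         # used to store the new number after summation of the original number
--         current_sum = 0
--
--         # here we loop through the array in order to obtain the new summation
--         for number in numbers:
--             current_sum += int(number)
--
--         # here we store the new number array based on the summation
--         numbers = list(str(current_sum))
--         # here we increment the iteration to keep track of loop
--         iterations += 1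
--
--     return iterations
-- ===== SOURCE B (Python) =====
-- def digitDegree(n):
--     s = str(n)
--     if len(s) <= 1:
--         return 0
--     return 1 + digitDegree(sum(int(c) for c in s))
-- ===== Notes on version B (the rewrite author's own statement) =====
-- stated objective: simpler
-- what changed: Replaced the explicit while-loop with a mutable digit list and iteration counter by a short recursion that returns one plus the digit degree of the digit sum, carrying the count implicitly.
import Mathlib
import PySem

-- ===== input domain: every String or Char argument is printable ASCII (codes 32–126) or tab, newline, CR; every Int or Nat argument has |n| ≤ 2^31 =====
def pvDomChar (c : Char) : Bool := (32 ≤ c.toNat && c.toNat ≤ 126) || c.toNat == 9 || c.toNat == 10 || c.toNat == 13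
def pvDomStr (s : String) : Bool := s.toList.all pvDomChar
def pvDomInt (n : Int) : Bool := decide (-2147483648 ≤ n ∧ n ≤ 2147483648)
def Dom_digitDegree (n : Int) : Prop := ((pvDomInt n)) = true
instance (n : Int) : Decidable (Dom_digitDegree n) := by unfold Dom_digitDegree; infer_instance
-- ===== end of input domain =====

-- B replaces A's explicit while-loop with a counter by a recursion returning 1 + digitDegree(digit sum); objective: simpler.

-- ===== PORT A =====
-- int(number) for a one-character string; total form (the `none` case, int('-'), is excluded by Pre_)
def chrInt (c : Char) : Int := (PySem.Int.ofChars? [c]).getD 0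

-- the while-loop: state is the digit list `numbers` and the counter `iterations`; fuel only guards totality
def digitDegreeLoop : Nat → List Char → Int → Int
  | 0, _, iterations => iterations
  | fuel + 1, numbers, iterations =>
    if numbers.length > 1 then
      let currentSum := numbers.foldl (fun acc number => acc + chrInt number) 0
      digitDegreeLoop fuel (PySem.Int.toChars currentSum) (iterations + 1)
    else iterations

def digitDegree (n : Int) : Int := digitDegreeLoop 64 (PySem.Int.toChars n) 0

-- ===== PORT B =====
-- recursive: 0 for a single digit, else 1 + digitDegree(sum of digits); fuel only guards totality
def digitDegreeRec : Nat → Int → Int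
  | 0, _ => 0
  | fuel + 1, n =>
    let s := PySem.Int.toChars n
    if s.length ≤ 1 then 0
    else 1 + digitDegreeRec fuel ((s.map (fun c => (PySem.Int.ofChars? [c]).getD 0)).sum)

def digitDegree_alt (n : Int) : Int := digitDegreeRec 64 n

-- ===== PRECONDITION & SPEC =====
-- Pre_ excludes negative n, on which the Python A raises ValueError (int('-')); B raises there identically.
def Pre_digitDegree (n : Int) : Prop := 0 ≤ n
instance (n : Int) : Decidable (Pre_digitDegree n) := by unfold Pre_digitDegree; infer_instance
def pvWitness_digitDegree : Int := 42

def Spec_digitDegree (n : Int) (out : Int) : Prop := out = digitDegree_alt n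
instance (n : Int) (out : Int) : Decidable (Spec_digitDegree n out) := by unfold Spec_digitDegree; infer_instance

-- ===== CLAIM (what is proved, stated in full; the proofs are below) =====
def Claim_equal_digitDegree : Prop := ∀ (n : Int), Dom_digitDegree n → Pre_digitDegree n → Spec_digitDegree n (digitDegree n)

-- ===== LEMMAS AND PROOFS =====

-- A's foldl digit sum equals B's map-then-sum digit sum
theorem foldl_chrInt_eq_sum_map (cs : List Char) :
    cs.foldl (fun acc number => acc + chrInt number) 0
      = (cs.map (fun c => (PySem.Int.ofChars? [c]).getD 0)).sum := by
  rw [List.sum_eq_foldl, List.foldl_map]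
  rfl

-- loop ↔ recursion, at equal fuel: the loop adds the recursion's value to its accumulator
theorem loop_eq_rec (fuel : Nat) : ∀ (n it : Int),
    digitDegreeLoop fuel (PySem.Int.toChars n) it = it + digitDegreeRec fuel n := by
  induction fuel with
  | zero => intro n it; simp [digitDegreeLoop, digitDegreeRec]
  | succ fuel ih =>
    intro n it
    by_cases h : (PySem.Int.toChars n).length > 1
    · simp only [digitDegreeLoop, digitDegreeRec]
      rw [if_pos h, if_neg (by omega : ¬ (PySem.Int.toChars n).length ≤ 1),
        foldl_chrInt_eq_sum_map, ih]
      ring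
    · simp only [digitDegreeLoop, digitDegreeRec]
      rw [if_neg h, if_pos (by omega : (PySem.Int.toChars n).length ≤ 1)]
      omega

-- ===== VERDICT (by name: the statement is the Claim_ definition above) =====
theorem digitDegree_spec : Claim_equal_digitDegree := by
  intro n _ _
  unfold Spec_digitDegree digitDegree digitDegree_alt
  rw [loop_eq_rec]
  ring
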